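-- pv_equiv track=rewrite | github.com/shurane/problems | daily-coding-challenge/2025.02.11.with.ken.word.count.engine.py | word_count_engine
-- ===== SOURCE A (Python) =====
-- from string import ascii_lowercase
--
-- def lower_and_remove_punctuation(s: str):
--     return "".join(c for c in s.lower() if c in ascii_lowercase)
--
-- def word_count_engine(document: str) -> list[list[str]]:
--     wordmap: dict[str, tuple[int,int]] = dict()
--
--     for i, word in enumerate(document.split(" ")):
--         normalized_word = lower_and_remove_punctuation(word)
--         if normalized_word not in wordmap:
--             wordmap[normalized_word] = (1,i)
--         else:
--             a,b = wordmap[normalized_word]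
--             wordmap[normalized_word] = (a+1, b)
--
--     if "" in wordmap:
--         del wordmap[""]
--
--     def keyfn(item: tuple[str, tuple[int,int]]) -> tuple[int, int]:
--         count = item[1][0]
--         index = item[1][1]
--         return (-count, index)
--
--     def to_str(item: tuple[str, tuple[int,int]]) -> list[str]:
--         return [item[0], str(item[1][0])]
--
--     values = list(map(to_str, sorted(wordmap.items(), key=keyfn)))
--     # pprint(values)
--
--     return values
-- ===== SOURCE B (Python) =====
-- from string import ascii_lowercase
--
--
-- def _normalize(word):
--     return "".join(c for c in word.lower() if c in ascii_lowercase)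
--
--
-- def word_count_engine(document):
--     words = [w for w in (_normalize(x) for x in document.split(" ")) if w]
--     counts = {}
--     for w in words:
--         counts[w] = counts.get(w, 0) + 1
--     if not counts:
--         return []
--     top = max(counts.values())
--     buckets = {}
--     for w, c in counts.items():
--         buckets.setdefault(c, []).append([w, str(c)])
--     return [entry for c in range(top, 0, -1) for entry in buckets.get(c, [])]
-- ===== Notes on version B (the rewrite author's own statement) =====
-- stated objective: alternative
-- what changed: B replaces A's comparison sort on explicit (-count, first-index) keys by a counting/bucket sort: it counts the non-empty normalized words, groups the counted words by their count into buckets (dict insertion order preserving first appearance), and emits buckets for count = max..1, storing no first-index and calling no sort.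
import Mathlib
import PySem

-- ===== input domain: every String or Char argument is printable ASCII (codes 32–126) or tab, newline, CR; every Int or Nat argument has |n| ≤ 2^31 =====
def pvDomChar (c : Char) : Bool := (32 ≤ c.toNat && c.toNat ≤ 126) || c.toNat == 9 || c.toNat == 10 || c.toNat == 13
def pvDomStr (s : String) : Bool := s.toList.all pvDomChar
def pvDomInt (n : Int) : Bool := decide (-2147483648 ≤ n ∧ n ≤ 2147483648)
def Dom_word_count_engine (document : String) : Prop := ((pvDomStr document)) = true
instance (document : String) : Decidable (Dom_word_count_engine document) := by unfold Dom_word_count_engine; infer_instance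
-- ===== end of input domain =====

-- ===== PORT A =====
-- B replaces A's comparison sort on (-count, first-index) keys by a counting/bucket
-- sort over the counts (buckets emitted for count = max..1); objective: alternative.
def pvAsciiLower : List Char := "abcdefghijklmnopqrstuvwxyz".toList

def lower_and_remove_punctuation (s : String) : String :=
  String.ofList (((PySem.Str.lower s).toList).filter (fun c => pvAsciiLower.contains c))

def word_count_engine (document : String) : List (List String) :=
  let wordmap : PySem.Dict String (Int × Int) :=
    (PySem.List.enumerate ((PySem.Chars.splitOn document.toList " ".toList).map String.ofList) 0).foldl
      (fun d p =>
        let nw := lower_and_remove_punctuation p.2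
        if d.contains nw = false then d.insert nw (1, p.1)
        else
          -- guarded by contains nw = true, so getD is exactly wordmap[nw]
          let ab := d.getD nw (0, 0)
          d.insert nw (ab.1 + 1, ab.2))
      PySem.Dict.empty
  let wordmap2 := if wordmap.contains "" then wordmap.erase "" else wordmap
  (PySem.List.sorted2 wordmap2.items (fun it => -it.2.1) (fun it => it.2.2) false).map
    (fun it => [it.1, PySem.Int.toStr it.2.1])

-- ===== PORT B =====
def bNormalize (word : String) : String :=
  String.ofList (((PySem.Str.lower word).toList).filter (fun c => pvAsciiLower.contains c))

def word_count_engine_alt (document : String) : List (List String) :=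
  let words := ((((PySem.Chars.splitOn document.toList " ".toList).map String.ofList)).map bNormalize).filter
    (fun w => decide (w ≠ ""))
  let counts := words.foldl (fun d w => d.insert w (d.getD w 0 + 1)) PySem.Dict.empty
  if counts.items = [] then []
  else
    -- counts is nonempty here, so Python's max(counts.values()) is defined; .getD 0 is its total form
    let top := (PySem.List.max? counts.values (fun v => v)).getD 0
    let buckets := counts.items.foldl
      (fun b p => b.modify p.2 [] (fun l => l ++ [[p.1, PySem.Int.toStr p.2]])) PySem.Dict.empty
    (PySem.List.pyRange top 0 (-1)).flatMap (fun c => buckets.getD c [])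

-- ===== PRECONDITION & SPEC =====
def Spec_word_count_engine (document : String) (out : List (List String)) : Prop := out = word_count_engine_alt document
instance (document : String) (out : List (List String)) : Decidable (Spec_word_count_engine document out) := by unfold Spec_word_count_engine; infer_instance

-- ===== CLAIM (what is proved, stated in full; the proofs are below) =====
def Claim_equal_word_count_engine : Prop := ∀ (document : String), Dom_word_count_engine document → Spec_word_count_engine document (word_count_engine document)

-- ===== LEMMAS AND PROOFS =====

-- the entry A's dict holds for a normalized word k, given the list nws of all normalized words
def pvEntry (nws : List String) (k : String) : String × (Int × Int) :=
  (k, ((nws.count k : Int), (List.idxOf k nws : Int)))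

-- A's loop body, named for the lemmas (definitionally the lambda in the port)
def pvStepA (d : PySem.Dict String (Int × Int)) (p : Int × String) : PySem.Dict String (Int × Int) :=
  let nw := lower_and_remove_punctuation p.2
  if d.contains nw = false then d.insert nw (1, p.1)
  else
    let ab := d.getD nw (0, 0)
    d.insert nw (ab.1 + 1, ab.2)

def pvQ : String → Bool := fun w => decide (w ≠ "")

theorem pvInsertBy_congr {α : Type} (p q : α → α → Bool) (x : α) (ys : List α)
    (h : ∀ y ∈ ys, p x y = q x y) :
    PySem.List.insertBy p x ys = PySem.List.insertBy q x ys := by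
  induction ys with
  | nil => rfl
  | cons y ys ih =>
    simp only [PySem.List.insertBy]
    rw [h y (by simp)]
    by_cases hq : q x y
    · simp [hq]
    · simp only [Bool.not_eq_true] at hq
      simp [hq, ih (fun z hz => h z (by simp [hz]))]

theorem pvSorted2_eq_sorted {α : Type} (xs : List α) (k1 k2 : α → Int)
    (h : xs.Pairwise (fun a b => k2 a < k2 b)) :
    PySem.List.sorted2 xs k1 k2 false = PySem.List.sorted xs k1 false := by
  show xs.foldl (fun acc x => PySem.List.insertBy
        (fun a b => decide (k1 a < k1 b) || (!decide (k1 b < k1 a) && decide (k2 a < k2 b))) x acc) []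
      = xs.foldl (fun acc x => PySem.List.insertBy (fun a b => decide (k1 a < k1 b)) x acc) []
  suffices hg : ∀ (xs : List α) (acc : List α),
      (∀ y ∈ acc, ∀ x ∈ xs, k2 y < k2 x) → xs.Pairwise (fun a b => k2 a < k2 b) →
      xs.foldl (fun acc x => PySem.List.insertBy
          (fun a b => decide (k1 a < k1 b) || (!decide (k1 b < k1 a) && decide (k2 a < k2 b))) x acc) acc
        = xs.foldl (fun acc x => PySem.List.insertBy (fun a b => decide (k1 a < k1 b)) x acc) acc by
    exact hg xs [] (by simp) h
  intro l
  induction l with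
  | nil => intro acc _ _; rfl
  | cons x l ih =>
    intro acc hacc hp
    simp only [List.foldl_cons]
    have hins : PySem.List.insertBy
        (fun a b => decide (k1 a < k1 b) || (!decide (k1 b < k1 a) && decide (k2 a < k2 b))) x acc
        = PySem.List.insertBy (fun a b => decide (k1 a < k1 b)) x acc := by
      apply pvInsertBy_congr
      intro y hy
      have h2 : k2 y < k2 x := hacc y hy x (by simp)
      have : ¬ (k2 x < k2 y) := by omega
      simp [this]
    rw [hins]
    apply ih
    · intro y hy z hz
      rcases (PySem.List.mem_insertBy _ _ _ _).1 hy with rfl | hy'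
      · exact (List.pairwise_cons.1 hp).1 z hz
      · exact hacc y hy' z (by simp [hz])
    · exact hp.tail

theorem pvOfList_filter {α : Type} [BEq α] [LawfulBEq α] (q : α → Bool) (l : List α) :
    PySem.Set.ofList (l.filter q) = (PySem.Set.ofList l).filter q := by
  induction l using List.reverseRecOn with
  | nil => rfl
  | append_singleton l x ih =>
    rw [List.filter_append, PySem.Set.ofList_append_singleton]
    by_cases hq : q x
    · simp only [List.filter_cons, hq, if_pos, List.filter_nil]
      rw [PySem.Set.ofList_append_singleton, PySem.Set.add_eq_ite, PySem.Set.add_eq_ite]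
      by_cases hm : x ∈ l
      · have : x ∈ PySem.Set.ofList l := (PySem.Set.mem_ofList _ _).2 hm
        simp [this, ih, List.mem_filter, hq]
      · have : x ∉ PySem.Set.ofList l := fun hc => hm ((PySem.Set.mem_ofList _ _).1 hc)
        simp [this, ih, List.filter_append, hq, List.mem_filter]
    · simp only [Bool.not_eq_true] at hq
      rw [PySem.Set.add_eq_ite]
      by_cases hm : x ∈ PySem.Set.ofList l
      · simp [hm, hq, ih]
      · simp [hm, List.filter_append, hq, ih]

theorem pvOfList_idx_pairwise {α : Type} [BEq α] [LawfulBEq α] (l : List α) :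
    (PySem.Set.ofList l).Pairwise (fun a b => List.idxOf a l < List.idxOf b l) := by
  induction l using List.reverseRecOn with
  | nil => simp [PySem.Set.ofList_nil]
  | append_singleton l x ih =>
    rw [PySem.Set.ofList_append_singleton, PySem.Set.add_eq_ite]
    by_cases hm : x ∈ PySem.Set.ofList l
    · have hml : x ∈ l := (PySem.Set.mem_ofList _ _).1 hm
      simp only [hm, if_pos]
      refine ih.imp_of_mem ?_
      intro a b ha hb hab
      have ha' : a ∈ l := (PySem.Set.mem_ofList _ _).1 ha
      have hb' : b ∈ l := (PySem.Set.mem_ofList _ _).1 hb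
      rwa [List.idxOf_append_of_mem ha', List.idxOf_append_of_mem hb']
    · have hml : x ∉ l := fun hc => hm ((PySem.Set.mem_ofList _ _).2 hc)
      simp only [hm, if_neg, not_false_iff]
      rw [List.pairwise_append]
      refine ⟨ih.imp_of_mem ?_, by simp, ?_⟩
      · intro a b ha hb hab
        have ha' : a ∈ l := (PySem.Set.mem_ofList _ _).1 ha
        have hb' : b ∈ l := (PySem.Set.mem_ofList _ _).1 hb
        rwa [List.idxOf_append_of_mem ha', List.idxOf_append_of_mem hb']
      · intro a ha b hb
        simp only [List.mem_singleton] at hb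
        subst hb
        have ha' : a ∈ l := (PySem.Set.mem_ofList _ _).1 ha
        rw [List.idxOf_append_of_mem ha']
        have h1 : List.idxOf a l < l.length := List.idxOf_lt_length_of_mem ha'
        have h2 : List.idxOf b (l ++ [b]) = l.length := by
          rw [List.idxOf_append]
          simp [List.idxOf_eq_length hml]
        omega

theorem pvA_fold_items (ws : List String) :
    ((PySem.List.enumerate ws 0).foldl pvStepA PySem.Dict.empty).items
      = (PySem.Set.ofList (ws.map lower_and_remove_punctuation)).map
          (pvEntry (ws.map lower_and_remove_punctuation)) := by
  induction ws using List.reverseRecOn with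
  | nil => rfl
  | append_singleton ws w ih =>
    have hL : (ws ++ [w]).map lower_and_remove_punctuation
        = ws.map lower_and_remove_punctuation ++ [lower_and_remove_punctuation w] := by
      rw [List.map_append]; rfl
    set nws := ws.map lower_and_remove_punctuation with hnws
    set nw := lower_and_remove_punctuation w with hnw
    set S := PySem.Set.ofList nws with hS
    set prev := (PySem.List.enumerate ws 0).foldl pvStepA PySem.Dict.empty with hprev
    have hkeys : prev.keys = S := by
      show prev.items.map (·.1) = S
      rw [ih, List.map_map]
      show S.map (fun k => k) = S
      simp
    have hnodup : prev.keys.Nodup := by rw [hkeys]; exact PySem.Set.nodup_ofList _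
    rw [hL, PySem.List.enumerate_append, List.foldl_append,
        PySem.List.enumerate_cons, PySem.List.enumerate_nil]
    rw [PySem.Set.ofList_append_singleton]
    simp only [List.foldl_cons, List.foldl_nil]
    show (pvStepA prev (0 + ↑ws.length, w)).items = _
    by_cases hm : nw ∈ nws
    · -- seen before: in-place update
      have hmS : nw ∈ S := (PySem.Set.mem_ofList _ _).2 hm
      have hcont : prev.contains nw = true := by
        rw [PySem.Dict.contains_iff_mem_keys, hkeys]; exact hmS
      have hgd : prev.getD nw (0, 0) = ((nws.count nw : Int), (List.idxOf nw nws : Int)) := by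
        apply PySem.Dict.getD_of_mem_items _ (by rw [ih]; exact List.mem_map.2 ⟨nw, hmS, rfl⟩) hnodup
      simp only [pvStepA]
      rw [← hnw, hcont]
      simp only [Bool.true_eq_false, if_neg, not_false_iff, hgd]
      rw [PySem.Dict.items_insert_of_contains _ _ hcont, ih, PySem.Set.add_of_mem hmS,
          List.map_map]
      apply List.map_congr_left
      intro k hk
      have hkl : k ∈ nws := (PySem.Set.mem_ofList _ _).1 hk
      by_cases hkeq : k = nw
      · subst hkeq
        simp [pvEntry, List.count_append,
              List.idxOf_append_of_mem hkl]
      · have h2 : (nw == k) = false := beq_eq_false_iff_ne.mpr (Ne.symm hkeq)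
        simp [pvEntry, h2, hkeq, List.count_append, List.count_singleton,
              List.idxOf_append_of_mem hkl]
    · -- fresh word: appended with index ws.length
      have hmS : nw ∉ S := fun hc => hm ((PySem.Set.mem_ofList _ _).1 hc)
      have hcont : prev.contains nw = false := by
        rw [Bool.eq_false_iff]
        intro hc
        exact hmS (by rw [← hkeys]; exact (PySem.Dict.contains_iff_mem_keys _ _).1 hc)
      simp only [pvStepA]
      rw [← hnw, hcont]
      simp only [if_pos]
      rw [PySem.Dict.items_insert_of_not_contains _ _ hcont, ih, PySem.Set.add_of_not_mem hmS,
          List.map_append]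
      congr 1
      · apply List.map_congr_left
        intro k hk
        have hkl : k ∈ nws := (PySem.Set.mem_ofList _ _).1 hk
        have hkeq : k ≠ nw := fun h => hm (h ▸ hkl)
        have h2 : (nw == k) = false := beq_eq_false_iff_ne.mpr (Ne.symm hkeq)
        simp [pvEntry, h2, List.count_append, List.count_singleton,
              List.idxOf_append_of_mem hkl]
      · have hc0 : nws.count nw = 0 := List.count_eq_zero.2 hm
        have hidx : List.idxOf nw (nws ++ [nw]) = nws.length := by
          rw [List.idxOf_append]
          simp [List.idxOf_eq_length hm]
        simp [pvEntry, List.count_append, hc0, hidx]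
        rw [hnws]
        simp

-- insertBy passes over a prefix it does not go before
theorem pvInsertBy_skip {α : Type} (p : α → α → Bool) (x : α) (B l : List α)
    (h : ∀ y ∈ B, p x y = false) :
    PySem.List.insertBy p x (B ++ l) = B ++ PySem.List.insertBy p x l := by
  induction B with
  | nil => rfl
  | cons b B ih =>
    simp only [List.cons_append, PySem.List.insertBy, h b (by simp)]
    simp [ih (fun y hy => h y (by simp [hy]))]

-- insertBy puts x in front when it goes before everything
theorem pvInsertBy_front {α : Type} (p : α → α → Bool) (x : α) (l : List α)
    (h : ∀ y ∈ l, p x y = true) :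
    PySem.List.insertBy p x l = x :: l := by
  cases l with
  | nil => rfl
  | cons b l => simp [PySem.List.insertBy, h b (by simp)]

-- inserting x (key x ∈ cs) into buckets over the strictly descending count list cs
theorem pvBucketInsert {α : Type} (key : α → Int) (cs : List Int) (xs : List α) (x : α)
    (hdesc : cs.Pairwise (fun a b => b < a)) (hx : key x ∈ cs) :
    PySem.List.insertBy (fun a b => decide (-(key a) < -(key b))) x
        (cs.flatMap (fun c => xs.filter (fun y => key y == c)))
      = cs.flatMap (fun c => (xs ++ [x]).filter (fun y => key y == c)) := by
  induction cs with
  | nil => cases hx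
  | cons c cs ih =>
    have hlt : ∀ c' ∈ cs, c' < c := fun c' hc' => (List.pairwise_cons.1 hdesc).1 c' hc'
    simp only [List.flatMap_cons]
    by_cases hxc : key x = c
    · have hskip : ∀ y ∈ xs.filter (fun y => key y == c),
          (fun a b => decide (-(key a) < -(key b))) x y = false := by
        intro y hy
        have : key y = c := by simpa using (List.mem_filter.1 hy).2
        simp [this, hxc]
      rw [pvInsertBy_skip _ _ _ _ hskip]
      have hfront : PySem.List.insertBy (fun a b => decide (-(key a) < -(key b))) x
          (cs.flatMap (fun c => xs.filter (fun y => key y == c)))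
          = x :: cs.flatMap (fun c => xs.filter (fun y => key y == c)) := by
        apply pvInsertBy_front
        intro y hy
        rcases List.mem_flatMap.1 hy with ⟨c', hc', hy'⟩
        have h1 : key y = c' := by simpa using (List.mem_filter.1 hy').2
        have h2 : c' < c := hlt c' hc'
        simp [h1, hxc]; omega
      rw [hfront]
      have hhead : (xs ++ [x]).filter (fun y => key y == c)
          = xs.filter (fun y => key y == c) ++ [x] := by
        rw [List.filter_append]; simp [hxc]
      have htail : ∀ c' ∈ cs, (xs ++ [x]).filter (fun y => key y == c')
          = xs.filter (fun y => key y == c') := by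
        intro c' hc'
        rw [List.filter_append]
        have : ¬ (key x = c') := by have := hlt c' hc'; omega
        simp [this]
      rw [hhead, List.flatMap_congr htail]
      simp
    · have hx' : key x ∈ cs := by rcases List.mem_cons.1 hx with h | h; exact absurd h hxc; exact h
      have hxlt : key x < c := hlt _ hx'
      have hskip : ∀ y ∈ xs.filter (fun y => key y == c),
          (fun a b => decide (-(key a) < -(key b))) x y = false := by
        intro y hy
        have : key y = c := by simpa using (List.mem_filter.1 hy).2
        simp [this]; omega
      rw [pvInsertBy_skip _ _ _ _ hskip, ih hdesc.tail hx']
      have : (xs ++ [x]).filter (fun y => key y == c) = xs.filter (fun y => key y == c) := by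
        rw [List.filter_append]; simp [hxc]
      rw [this]

-- a stable sort on key -count of elements whose counts all lie in the strictly
-- descending list cs is exactly the bucket concatenation over cs
theorem pvBucketSort {α : Type} (key : α → Int) (cs : List Int) (xs : List α)
    (hdesc : cs.Pairwise (fun a b => b < a)) (hmem : ∀ y ∈ xs, key y ∈ cs) :
    PySem.List.sorted xs (fun a => -(key a)) false
      = cs.flatMap (fun c => xs.filter (fun y => key y == c)) := by
  induction xs using List.reverseRecOn with
  | nil => simp [PySem.List.sorted]
  | append_singleton xs x ih =>
    rw [PySem.List.sorted_eq_foldl_insertBy, List.foldl_append]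
    simp only [List.foldl_cons, List.foldl_nil]
    rw [← PySem.List.sorted_eq_foldl_insertBy,
        ih (fun y hy => hmem y (by simp [hy]))]
    exact pvBucketInsert key cs xs x hdesc (hmem x (by simp))

theorem pvMain (document : String) :
    word_count_engine document = word_count_engine_alt document := by
  unfold word_count_engine word_count_engine_alt
  set ws := (PySem.Chars.splitOn document.toList " ".toList).map String.ofList with hws
  set nws := ws.map lower_and_remove_punctuation with hnws
  set S := PySem.Set.ofList nws with hS
  show (PySem.List.sorted2
      (let wordmap := (PySem.List.enumerate ws 0).foldl pvStepA PySem.Dict.empty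
       let wordmap2 := if wordmap.contains "" then wordmap.erase "" else wordmap
       wordmap2).items
      (fun it => -it.2.1) (fun it => it.2.2) false).map
        (fun it => [it.1, PySem.Int.toStr it.2.1])
    = (let words := (ws.map bNormalize).filter (fun w => decide (w ≠ ""))
       let counts := words.foldl (fun d w => d.insert w (d.getD w 0 + 1)) PySem.Dict.empty
       if counts.items = []
       then []
       else
         (PySem.List.pyRange ((PySem.List.max? counts.values (fun v => v)).getD 0) 0 (-1)).flatMap
           (fun c =>
             (counts.items.foldl
               (fun b p => b.modify p.2 [] (fun l => l ++ [[p.1, PySem.Int.toStr p.2]])) PySem.Dict.empty).getD c []))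
  have hwords : (ws.map bNormalize).filter (fun w => decide (w ≠ "")) = nws.filter pvQ := rfl
  rw [hwords]
  show _
    = (if ((nws.filter pvQ).foldl (fun d w => d.insert w (d.getD w 0 + 1)) (PySem.Dict.empty : PySem.Dict String Int)).items = []
       then ([] : List (List String))
       else
         (PySem.List.pyRange ((PySem.List.max? ((nws.filter pvQ).foldl (fun d w => d.insert w (d.getD w 0 + 1)) (PySem.Dict.empty : PySem.Dict String Int)).values (fun v => v)).getD 0) 0 (-1)).flatMap
           (fun c =>
             (((nws.filter pvQ).foldl (fun d w => d.insert w (d.getD w 0 + 1)) (PySem.Dict.empty : PySem.Dict String Int)).items.foldl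
               (fun b p => b.modify p.2 [] (fun l => l ++ [[p.1, PySem.Int.toStr p.2]])) PySem.Dict.empty).getD c []))
  set cnts := ((nws.filter pvQ).foldl (fun d w => d.insert w (d.getD w 0 + 1)) (PySem.Dict.empty : PySem.Dict String Int)) with hcnts
  set prev := (PySem.List.enumerate ws 0).foldl pvStepA PySem.Dict.empty with hprevd
  have hprev : prev.items = S.map (pvEntry nws) := pvA_fold_items ws
  -- A's dict after the '' deletion
  have hW2 : (if prev.contains "" then prev.erase "" else prev).items
      = (S.filter pvQ).map (pvEntry nws) := by
    by_cases hc : prev.contains "" = true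
    · rw [if_pos hc]
      show prev.items.filter (fun p => !(p.1 == "")) = _
      rw [hprev, List.filter_map]
      refine congrArg _ (List.filter_congr ?_)
      intro k hk
      simp [pvEntry, pvQ, Function.comp, beq_eq_decide]
    · rw [if_neg hc]
      rw [hprev]
      have hne : ∀ k ∈ S, pvQ k = true := by
        intro k hk
        have : k ≠ "" := by
          rintro rfl
          apply hc
          rw [PySem.Dict.contains_iff_mem_keys]
          show "" ∈ prev.items.map (·.1)
          rw [hprev, List.map_map]
          exact List.mem_map.2 ⟨"", hk, rfl⟩
        simp [pvQ, this]
      rw [List.filter_eq_self.2 hne]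
  set T := (S.filter pvQ).map (pvEntry nws) with hT
  -- B's counting dict is Counter(words); its items are T projected to (word, count)
  have hCitems : cnts.items = T.map (fun it => (it.1, it.2.1)) := by
    rw [hcnts, PySem.Dict.foldl_insert_getD_add_one_eq_counter, PySem.Dict.items_counter,
        pvOfList_filter, hT, List.map_map]
    apply List.map_congr_left
    intro k hk
    have hq : pvQ k = true := (List.mem_filter.1 hk).2
    simp [pvEntry, List.count_filter hq]
  -- A's explicit tuple-key sort is the stable sort on -count alone (indices increase)
  have hpw : T.Pairwise (fun a b => (fun it : String × (Int × Int) => it.2.2) a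
      < (fun it : String × (Int × Int) => it.2.2) b) := by
    rw [hT, List.pairwise_map]
    refine ((pvOfList_idx_pairwise nws).filter pvQ).imp ?_
    intro a b hab
    simp only [pvEntry]
    exact_mod_cast hab
  rw [hW2, pvSorted2_eq_sorted T (fun it => -it.2.1) (fun it => it.2.2) hpw, hCitems]
  by_cases hE : T = []
  · simp [hE, PySem.List.sorted]
  · have hne : T.map (fun it : String × (Int × Int) => (it.1, it.2.1)) ≠ [] := by simp [hE]
    rw [if_neg hne]
    have hvals : cnts.values = (T.map (fun it : String × (Int × Int) => (it.1, it.2.1))).map (·.2) := by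
      show cnts.items.map (·.2) = _
      rw [hCitems]
    obtain ⟨m, hm⟩ : ∃ m, PySem.List.max? cnts.values (fun v => v) = some m := by
      cases h : PySem.List.max? cnts.values (fun v => v) with
      | none =>
        rw [PySem.List.max?_eq_none_iff, hvals] at h
        simp [hE] at h
      | some m => exact ⟨m, rfl⟩
    rw [hm]
    show _ = (PySem.List.pyRange m 0 (-1)).flatMap _
    -- every count of T lies in the countdown range m..1
    have hmem : ∀ y ∈ T, (fun it : String × (Int × Int) => it.2.1) y ∈ PySem.List.pyRange m 0 (-1) := by
      intro y hy
      rw [PySem.List.mem_pyRange_neg_one]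
      have hle : ∀ v ∈ cnts.values, v ≤ m := by
        intro v hv
        exact PySem.List.max?_isMax hm v hv
      constructor
      · rw [hT] at hy
        rcases List.mem_map.1 hy with ⟨k, hk, rfl⟩
        have hkS : k ∈ S := (List.mem_filter.1 hk).1
        have hknws : k ∈ nws := (PySem.Set.mem_ofList _ _).1 hkS
        have : 0 < nws.count k := List.count_pos_iff.2 hknws
        simp only [pvEntry]
        exact_mod_cast this
      · apply hle
        rw [hvals]
        exact List.mem_map.2 ⟨_, List.mem_map.2 ⟨y, hy, rfl⟩, rfl⟩
    have hdesc : (PySem.List.pyRange m 0 (-1)).Pairwise (fun a b => b < a) := by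
      rw [PySem.List.pyRange_neg_one_eq_reverse, List.pairwise_reverse]
      exact PySem.List.pairwise_lt_pyRange_one _ _
    rw [pvBucketSort (fun it : String × (Int × Int) => it.2.1) (PySem.List.pyRange m 0 (-1)) T hdesc hmem]
    -- each bucket of B's grouping dict is the corresponding filtered slice of the items
    have hbuck : ∀ c : Int,
        ((T.map (fun it : String × (Int × Int) => (it.1, it.2.1))).foldl
            (fun b p => b.modify p.2 [] (fun l => l ++ [[p.1, PySem.Int.toStr p.2]])) PySem.Dict.empty).getD c []
          = ((T.map (fun it : String × (Int × Int) => (it.1, it.2.1))).filter (fun p => p.2 == c)).map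
              (fun p => [p.1, PySem.Int.toStr p.2]) := by
      intro c
      have h1 : (T.map (fun it : String × (Int × Int) => (it.1, it.2.1))).foldl
            (fun b p => b.modify p.2 [] (fun l => l ++ [[p.1, PySem.Int.toStr p.2]])) PySem.Dict.empty
          = (((T.map (fun it : String × (Int × Int) => (it.1, it.2.1))).map
               (fun p => (p.2, [p.1, PySem.Int.toStr p.2]))).foldl
              (fun d q => d.modify q.1 [] (fun l => l ++ [q.2])) PySem.Dict.empty) := by
        simp only [List.foldl_map]
      rw [h1, PySem.Dict.getD_foldl_modify_append]
      simp only [List.filter_map, List.map_map, PySem.Dict.getD_empty, List.nil_append]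
      rfl
    simp only [hbuck]
    rw [List.map_flatMap]
    refine List.flatMap_congr ?_
    intro c hc
    conv_rhs => rw [List.filter_map, List.map_map]
    rfl

-- ===== VERDICT (by name: the statement is the Claim_ definition above) =====
theorem word_count_engine_spec : Claim_equal_word_count_engine := by
  intro document _
  show word_count_engine document = word_count_engine_alt document
  exact pvMain document
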